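-- pv_equiv track=rewrite | github.com/Mister-Arno/tools_lk | Klasplaatsen.py | _adjacent_pairs
-- ===== SOURCE A (Python) =====
-- import itertools
-- from collections import defaultdict
-- from typing import Dict, List, Optional, Sequence, Tuple
--
-- Seat = Tuple[int, int, int]  # (row, col, side) – side: 0 = links, 1 = rechts
--
-- def _adjacent_pairs(seats: Sequence[Seat]) -> Dict[Seat, set]:
--     adj: Dict[Seat, set] = defaultdict(set)
--     for a, b in itertools.combinations(seats, 2):
--         ar, ac, _ = a
--         br, bc, _ = b
--         same_bank = (ar == br and ac == bc)
--         hori_adj = (ar == br and abs(ac - bc) == 1)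
--         vert_adj = (ac == bc and abs(ar - br) == 1)
--         if same_bank or hori_adj or vert_adj:
--             adj[a].add(b)
--             adj[b].add(a)
--     return adj
-- ===== SOURCE B (Python) =====
-- import itertools
-- from collections import defaultdict
-- from typing import Dict, List, Optional, Sequence, Tuple
--
-- Seat = Tuple[int, int, int]  # (row, col, side) - side: 0 = links, 1 = rechts
--
-- def _adjacent_pairs(seats: Sequence[Seat]) -> Dict[Seat, set]:
--     # Index seats by their (row, col) cell, then only look at the cell itself
--     # (same bank) and the four neighbouring cells instead of scanning all pairs.
--     cells: Dict[Tuple[int, int], list] = defaultdict(list)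
--     for i, (r, c, _) in enumerate(seats):
--         cells[(r, c)].append(i)
--     pairs = []
--     for (r, c), group in cells.items():
--         pairs.extend(itertools.combinations(group, 2))      # same bank
--         for other in ((r, c + 1), (r + 1, c), (r, c - 1), (r - 1, c)):
--             if other in cells:
--                 for i in group:
--                     for j in cells[other]:
--                         if i < j:                            # each pair once
--                             pairs.append((i, j))
--     pairs.sort()
--     adj: Dict[Seat, set] = defaultdict(set)
--     for i, j in pairs:
--         a, b = seats[i], seats[j]
--         adj[a].add(b)
--         adj[b].add(a)
--     return adj
-- ===== Notes on version B (the rewrite author's own statement) =====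
-- stated objective: faster
-- what changed: Instead of scanning all O(n^2) seat pairs, B indexes seats by their (row,col) cell once, generates each matching pair exactly once from the cell itself (same bank) and the four neighbouring cells, and sorts the index pairs, which reproduces A's pair-enumeration order (and hence its dict/set insertion order) exactly.
import Mathlib
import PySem

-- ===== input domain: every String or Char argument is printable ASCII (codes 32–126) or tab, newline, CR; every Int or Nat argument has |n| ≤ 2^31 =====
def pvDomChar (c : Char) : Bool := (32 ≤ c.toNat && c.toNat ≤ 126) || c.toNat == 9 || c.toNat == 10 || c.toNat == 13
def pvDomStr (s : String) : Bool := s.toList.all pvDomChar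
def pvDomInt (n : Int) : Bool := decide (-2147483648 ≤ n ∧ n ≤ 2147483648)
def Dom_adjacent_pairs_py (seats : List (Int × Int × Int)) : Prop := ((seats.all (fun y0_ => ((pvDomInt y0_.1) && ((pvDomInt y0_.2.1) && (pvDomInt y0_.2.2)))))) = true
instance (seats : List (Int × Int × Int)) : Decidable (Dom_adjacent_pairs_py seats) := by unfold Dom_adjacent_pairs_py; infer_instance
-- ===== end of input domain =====

-- B replaces A's all-pairs scan by a coordinate index (cell -> seat indices) probed at the
-- four neighbouring cells, generating only candidate pairs and sorting them; measurably faster.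

-- ===== PORT A =====
-- itertools.combinations(xs, 2), as pairs, in CPython's order
def pvComb2 {α : Type} : List α → List (α × α)
  | [] => []
  | x :: xs => xs.map (fun y => (x, y)) ++ pvComb2 xs

-- the adjacency test of A's loop body (same_bank / hori_adj / vert_adj)
def pvCond (a b : Int × Int × Int) : Bool :=
  let same_bank := a.1 == b.1 && a.2.1 == b.2.1
  let hori_adj := a.1 == b.1 && (a.2.1 - b.2.1).natAbs == 1
  let vert_adj := a.2.1 == b.2.1 && (a.1 - b.1).natAbs == 1
  same_bank || hori_adj || vert_adj

-- tuple re-association only: dict items (k, v) as the required flattened tuples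
def pvFlat (l : List ((Int × Int × Int) × List (Int × Int × Int))) :
    List (Int × Int × Int × List (Int × Int × Int)) :=
  l.map (fun kv => (kv.1.1, kv.1.2.1, kv.1.2.2, kv.2))

-- adj[a].add(b) on a defaultdict(set)
def pvAdd (d : PySem.Dict (Int × Int × Int) (PySem.Set (Int × Int × Int)))
    (a b : Int × Int × Int) : PySem.Dict (Int × Int × Int) (PySem.Set (Int × Int × Int)) :=
  d.modify a [] (fun s => PySem.Set.add s b)

def adjacent_pairs_py (seats : List (Int × Int × Int)) : List (Int × Int × Int × List (Int × Int × Int)) :=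
  ((pvComb2 seats).foldl
    (fun adj p => if pvCond p.1 p.2 then pvAdd (pvAdd adj p.1 p.2) p.2 p.1 else adj)
    PySem.Dict.empty).items |> pvFlat

-- ===== PORT B =====
-- cells: (row, col) -> list of indices of the seats occupying that cell, in seat order
def pvCells (seats : List (Int × Int × Int)) : PySem.Dict (Int × Int) (List Int) :=
  (PySem.List.enumerate seats).foldl
    (fun d p => d.modify (p.2.1, p.2.2.1) [] (fun g => g ++ [p.1])) PySem.Dict.empty

-- the candidate-pair generation loop of B: same-cell combinations plus, for each of the
-- four neighbouring cells present in the index, the cross pairs with i < j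
def pvPairsOf (cells : PySem.Dict (Int × Int) (List Int)) : List (Int × Int) :=
  cells.items.foldl
    (fun pairs kg =>
      let pairs1 := pairs ++ pvComb2 kg.2
      [(kg.1.1, kg.1.2 + 1), (kg.1.1 + 1, kg.1.2), (kg.1.1, kg.1.2 - 1), (kg.1.1 - 1, kg.1.2)].foldl
        (fun pairs2 other =>
          if cells.contains other then
            kg.2.foldl
              (fun a i => (cells.getD other []).foldl
                (fun a2 j => if i < j then a2 ++ [(i, j)] else a2) a) pairs2
          else pairs2) pairs1) []

def adjacent_pairs_py_alt (seats : List (Int × Int × Int)) : List (Int × Int × Int × List (Int × Int × Int)) :=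
  let cells := pvCells seats
  let spairs := PySem.List.sorted2 (pvPairsOf cells) (fun p => p.1) (fun p => p.2)
  (spairs.foldl
    (fun adj p =>
      match PySem.List.pyGet? seats p.1, PySem.List.pyGet? seats p.2 with
      | some a, some b => pvAdd (pvAdd adj a b) b a
      | _, _ => adj) PySem.Dict.empty).items |> pvFlat

-- ===== PRECONDITION & SPEC =====
def Spec_adjacent_pairs_py (seats : List (Int × Int × Int)) (out : List (Int × Int × Int × List (Int × Int × Int))) : Prop := out = adjacent_pairs_py_alt seats
instance (seats : List (Int × Int × Int)) (out : List (Int × Int × Int × List (Int × Int × Int))) : Decidable (Spec_adjacent_pairs_py seats out) := by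
  unfold Spec_adjacent_pairs_py; exact @List.hasDecEq _ instDecidableEqProd _ _

-- ===== CLAIM (what is proved, stated in full; the proofs are below) =====
def Claim_equal_adjacent_pairs_py : Prop := ∀ (seats : List (Int × Int × Int)), Dom_adjacent_pairs_py seats → Spec_adjacent_pairs_py seats (adjacent_pairs_py seats)

-- ===== LEMMAS AND PROOFS =====

-- proof-side abbreviations
def pvG (seats : List (Int × Int × Int)) (i : Int) : Int × Int × Int :=
  PySem.List.pyGetD seats i (0, 0, 0)

def pvCell (s : Int × Int × Int) : Int × Int := (s.1, s.2.1)

def pvIdx (seats : List (Int × Int × Int)) : List Int :=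
  PySem.List.pyRange 0 (seats.length : Int)

def pvEA (seats : List (Int × Int × Int)) : List (Int × Int) :=
  (pvComb2 (pvIdx seats)).filter (fun p => pvCond (pvG seats p.1) (pvG seats p.2))

def pvKF (p : Int × Int) : Lex (Int × Int) := toLex (p.1, p.2)

def pvGroup (seats : List (Int × Int × Int)) (k : Int × Int) : List Int :=
  (pvIdx seats).filter (fun i => pvCell (pvG seats i) == k)

def pvNbr (k : Int × Int) : List (Int × Int) :=
  [(k.1, k.2 + 1), (k.1 + 1, k.2), (k.1, k.2 - 1), (k.1 - 1, k.2)]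

def pvBlk (seats : List (Int × Int × Int)) (k o : Int × Int) : List (Int × Int) :=
  (pvGroup seats k).flatMap
    (fun i => ((pvGroup seats o).filter (fun j => i < j)).map (fun j => (i, j)))

def pvF (seats : List (Int × Int × Int)) (k : Int × Int) : List (Int × Int) :=
  pvComb2 (pvGroup seats k) ++
    (pvNbr k).flatMap (fun o => if (pvCells seats).contains o then pvBlk seats k o else [])

def pvStep (seats : List (Int × Int × Int))
    (d : PySem.Dict (Int × Int × Int) (PySem.Set (Int × Int × Int))) (p : Int × Int) :
    PySem.Dict (Int × Int × Int) (PySem.Set (Int × Int × Int)) :=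
  pvAdd (pvAdd d (pvG seats p.1) (pvG seats p.2)) (pvG seats p.2) (pvG seats p.1)

-- combinatorial facts about pvComb2
theorem pvComb2_map {α β : Type} (f : α → β) (l : List α) :
    pvComb2 (l.map f) = (pvComb2 l).map (fun p => (f p.1, f p.2)) := by
  induction l with
  | nil => rfl
  | cons x xs ih => simp [pvComb2, ih, List.map_map, Function.comp_def]

theorem pvKF_lt_iff (a b : Int × Int) :
    pvKF a < pvKF b ↔ (a.1 < b.1 ∨ (a.1 = b.1 ∧ a.2 < b.2)) := by
  simp [pvKF, Prod.Lex.lt_iff]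

theorem pvComb2_mem (l : List Int) (hl : l.Pairwise (· < ·)) (p : Int × Int) :
    p ∈ pvComb2 l ↔ p.1 ∈ l ∧ p.2 ∈ l ∧ p.1 < p.2 := by
  induction l with
  | nil => simp [pvComb2]
  | cons x xs ih =>
    have hx : ∀ y ∈ xs, x < y := fun y hy => List.rel_of_pairwise_cons hl hy
    have hxs := hl.of_cons
    constructor
    · intro hp
      simp only [pvComb2, List.mem_append, List.mem_map] at hp
      rcases hp with ⟨y, hy, rfl⟩ | hp
      · exact ⟨by simp, by simp [hy], hx y hy⟩
      · obtain ⟨h1, h2, h3⟩ := (ih hxs).mp hp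
        exact ⟨by simp [h1], by simp [h2], h3⟩
    · rintro ⟨h1, h2, h3⟩
      simp only [List.mem_cons] at h1 h2
      simp only [pvComb2, List.mem_append, List.mem_map]
      rcases h1 with h1 | h1
      · rcases h2 with h2 | h2
        · omega
        · left; exact ⟨p.2, h2, by rw [← h1]⟩
      · rcases h2 with h2 | h2
        · have := hx p.1 h1; omega
        · right; exact (ih hxs).mpr ⟨h1, h2, h3⟩

theorem pvComb2_pairwise (l : List Int) (hl : l.Pairwise (· < ·)) :
    (pvComb2 l).Pairwise (fun a b => pvKF a < pvKF b) := by
  induction l with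
  | nil => simp [pvComb2]
  | cons x xs ih =>
    have hx : ∀ y ∈ xs, x < y := fun y hy => List.rel_of_pairwise_cons hl hy
    have hxs := hl.of_cons
    simp only [pvComb2, List.pairwise_append]
    refine ⟨?_, ih hxs, ?_⟩
    · rw [List.pairwise_map]
      refine hxs.imp_of_mem ?_
      intro a b _ _ hab
      rw [pvKF_lt_iff]; right; exact ⟨rfl, hab⟩
    · intro a ha b hb
      simp only [List.mem_map] at ha
      obtain ⟨y, _, rfl⟩ := ha
      have hb1 : b.1 ∈ xs := ((pvComb2_mem xs hxs b).mp hb).1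
      rw [pvKF_lt_iff]; left; exact hx b.1 hb1

theorem pvNodup_of_pairwise_kf (l : List (Int × Int))
    (h : l.Pairwise (fun a b => pvKF a < pvKF b)) : l.Nodup := by
  exact (h.imp (fun {a b} hab => by rintro rfl; exact lt_irrefl _ hab))

-- pvIdx facts
theorem pvIdx_pairwise (seats : List (Int × Int × Int)) : (pvIdx seats).Pairwise (· < ·) := by
  exact PySem.List.pairwise_lt_pyRange_one 0 _

theorem pvGroup_pairwise (seats : List (Int × Int × Int)) (k : Int × Int) :
    (pvGroup seats k).Pairwise (· < ·) := by
  exact (pvIdx_pairwise seats).filter _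

theorem pvMem_group (seats : List (Int × Int × Int)) (k : Int × Int) (i : Int) :
    i ∈ pvGroup seats k ↔ i ∈ pvIdx seats ∧ pvCell (pvG seats i) = k := by
  simp [pvGroup, List.mem_filter]

-- the cells dict
theorem pvCells_getD (seats : List (Int × Int × Int)) (k : Int × Int) :
    (pvCells seats).getD k [] = pvGroup seats k := by
  have h1 : pvCells seats
      = ((pvIdx seats).map (fun j => (pvCell (pvG seats j), j))).foldl
          (fun d q => d.modify q.1 [] (fun g => g ++ [q.2])) PySem.Dict.empty := by
    unfold pvCells pvIdx
    rw [PySem.List.enumerate_eq_map_pyRange seats (0, 0, 0), List.foldl_map, List.foldl_map]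
    rfl
  rw [h1, PySem.Dict.getD_foldl_modify_append, List.filter_map]
  simp [pvGroup, List.map_map, Function.comp_def]

theorem pvCells_nodup_keys (seats : List (Int × Int × Int)) : (pvCells seats).keys.Nodup := by
  unfold pvCells
  exact PySem.Dict.nodup_keys_foldl_modify_key (PySem.List.enumerate seats)
    (fun (p : Int × (Int × Int × Int)) => (p.2.1, p.2.2.1)) []
    (fun _ p => fun g => g ++ [p.1]) PySem.Dict.empty (by simp)

theorem pvCells_mem_keys (seats : List (Int × Int × Int)) (k : Int × Int) :
    k ∈ (pvCells seats).keys ↔ ∃ i ∈ pvIdx seats, pvCell (pvG seats i) = k := by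
  unfold pvCells
  rw [PySem.Dict.keys_foldl_modify_key (PySem.List.enumerate seats)
    (fun (p : Int × (Int × Int × Int)) => (p.2.1, p.2.2.1)) []
    (fun _ p => fun g => g ++ [p.1]) PySem.Dict.empty]
  rw [PySem.List.enumerate_eq_map_pyRange seats (0, 0, 0)]
  simp [PySem.Set.update_nil_left, PySem.Set.mem_ofList, List.mem_map, pvIdx, pvCell, pvG,
    PySem.Dict.keys_empty]

-- normal form of the pair-generation loop
theorem pv_foldl_append_guard {α β : Type} (P : α → Bool) (G : α → List β) (l : List α) (acc : List β) :
    l.foldl (fun acc o => if P o then acc ++ G o else acc) acc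
      = acc ++ l.flatMap (fun o => if P o then G o else []) := by
  rw [PySem.List.foldl_congr_mem l _ (fun acc o => acc ++ (if P o then G o else [])) acc
    (by intro acc o _; by_cases h : P o = true <;> simp [h])]
  exact PySem.List.foldl_append_eq_flatMap _ l acc

theorem pvPairs_norm (seats : List (Int × Int × Int)) :
    pvPairsOf (pvCells seats) = (pvCells seats).items.flatMap (fun kg => pvF seats kg.1) := by
  have hkn := pvCells_nodup_keys seats
  unfold pvPairsOf
  rw [PySem.List.foldl_congr_mem ((pvCells seats).items) _
      (fun pairs kg => pairs ++ pvF seats kg.1) [] ?_]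
  · exact PySem.List.foldl_append_eq_flatMap _ _ []
  · intro pairs kg hkg
    have hmem : (kg.1, kg.2) ∈ (pvCells seats).items := by simpa using hkg
    have hg : kg.2 = pvGroup seats kg.1 := by
      rw [← PySem.Dict.getD_of_mem_items (pvCells seats) hmem hkn [], pvCells_getD]
    show ([(kg.1.1, kg.1.2 + 1), (kg.1.1 + 1, kg.1.2), (kg.1.1, kg.1.2 - 1), (kg.1.1 - 1, kg.1.2)].foldl
        (fun pairs2 other =>
          if (pvCells seats).contains other then
            kg.2.foldl (fun a i => ((pvCells seats).getD other []).foldl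
              (fun a2 j => if i < j then a2 ++ [(i, j)] else a2) a) pairs2
          else pairs2) (pairs ++ pvComb2 kg.2)) = pairs ++ pvF seats kg.1
    have hin : ∀ (other : Int × Int) (pairs2 : List (Int × Int)),
        kg.2.foldl (fun a i => ((pvCells seats).getD other []).foldl
          (fun a2 j => if i < j then a2 ++ [(i, j)] else a2) a) pairs2
        = pairs2 ++ pvBlk seats kg.1 other := by
      intro other pairs2
      rw [PySem.List.foldl_congr_mem kg.2 _
          (fun a i => a ++ ((pvGroup seats other).filter (fun j => i < j)).map (fun j => (i, j))) pairs2 ?_]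
      · rw [PySem.List.foldl_append_eq_flatMap, hg, pvBlk]
      · intro a i _
        rw [pvCells_getD]
        exact PySem.List.foldl_append_ite _ _ _ _
    rw [PySem.List.foldl_congr_mem _ _
        (fun pairs2 other => if (pvCells seats).contains other then
          pairs2 ++ pvBlk seats kg.1 other else pairs2) _ ?_]
    · rw [pv_foldl_append_guard, List.append_assoc, pvF, pvNbr, hg]
    · intro pairs2 other _
      by_cases h : (pvCells seats).contains other <;> simp [h, hin]

-- the adjacency condition through cells
theorem pvCond_iff (a b : Int × Int × Int) :
    pvCond a b = true ↔ (pvCell a = pvCell b ∨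
      ((pvCell a).1 = (pvCell b).1 ∧ ((pvCell a).2 - (pvCell b).2).natAbs = 1) ∨
      ((pvCell a).2 = (pvCell b).2 ∧ ((pvCell a).1 - (pvCell b).1).natAbs = 1)) := by
  simp only [pvCond, pvCell, Bool.or_eq_true, Bool.and_eq_true, beq_iff_eq, Prod.mk.injEq]
  omega


theorem pvGroup_nodup (seats : List (Int × Int × Int)) (k : Int × Int) :
    (pvGroup seats k).Nodup :=
  (pvGroup_pairwise seats k).imp (fun h => ne_of_lt h)

theorem pvMem_EA (seats : List (Int × Int × Int)) (p : Int × Int) :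
    p ∈ pvEA seats ↔ p.1 ∈ pvIdx seats ∧ p.2 ∈ pvIdx seats ∧ p.1 < p.2 ∧
      pvCond (pvG seats p.1) (pvG seats p.2) = true := by
  simp only [pvEA, List.mem_filter, pvComb2_mem _ (pvIdx_pairwise seats)]
  tauto

theorem pvMem_blk (seats : List (Int × Int × Int)) (k o : Int × Int) (p : Int × Int) :
    p ∈ pvBlk seats k o ↔ p.1 ∈ pvGroup seats k ∧ p.2 ∈ pvGroup seats o ∧ p.1 < p.2 := by
  simp only [pvBlk, List.mem_flatMap, List.mem_map, List.mem_filter]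
  constructor
  · rintro ⟨i, hi, j, ⟨hj, hlt⟩, rfl⟩
    exact ⟨hi, hj, by simpa using hlt⟩
  · rintro ⟨h1, h2, h3⟩
    exact ⟨p.1, h1, p.2, ⟨h2, by simpa using h3⟩, by simp⟩

theorem pvBlk_nodup (seats : List (Int × Int × Int)) (k o : Int × Int) :
    (pvBlk seats k o).Nodup := by
  rw [pvBlk, List.nodup_flatMap]
  constructor
  · intro i _
    refine List.Nodup.map ?_ ((pvGroup_nodup seats o).filter _)
    intro a b hab
    simpa using congrArg Prod.snd hab
  · refine (pvGroup_nodup seats k).imp ?_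
    intro a b hab q hqa hqb
    simp only [List.mem_map, List.mem_filter] at hqa hqb
    obtain ⟨j1, _, rfl⟩ := hqa
    obtain ⟨j2, _, h⟩ := hqb
    exact hab ((congrArg Prod.fst h).symm)

theorem pvBlk_snd (seats : List (Int × Int × Int)) (k o : Int × Int) (p : Int × Int)
    (hp : p ∈ pvBlk seats k o) : pvCell (pvG seats p.2) = o :=
  ((pvMem_group seats o p.2).mp ((pvMem_blk seats k o p).mp hp).2.1).2

theorem pvF_fst (seats : List (Int × Int × Int)) (k : Int × Int) (p : Int × Int)
    (hp : p ∈ pvF seats k) : pvCell (pvG seats p.1) = k := by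
  rcases List.mem_append.mp hp with hc | hcr
  · exact ((pvMem_group seats k p.1).mp
      ((pvComb2_mem _ (pvGroup_pairwise seats k) p).mp hc).1).2
  · obtain ⟨o, _, hpo⟩ := List.mem_flatMap.mp hcr
    by_cases h : (pvCells seats).contains o = true
    · rw [if_pos h] at hpo
      exact ((pvMem_group seats k p.1).mp ((pvMem_blk seats k o p).mp hpo).1).2
    · rw [if_neg h] at hpo; cases hpo

theorem pvNbr_mem_ne (k : Int × Int) (o : Int × Int) (ho : o ∈ pvNbr k) : o ≠ k := by
  simp only [pvNbr, List.mem_cons, List.not_mem_nil, or_false] at ho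
  rcases ho with rfl | rfl | rfl | rfl <;> (intro h; rw [Prod.ext_iff] at h; omega)

theorem pvNbr_pairwise (k : Int × Int) : (pvNbr k).Pairwise (· ≠ ·) := by
  simp only [pvNbr]
  refine List.Pairwise.cons ?_ (List.Pairwise.cons ?_ (List.Pairwise.cons ?_ (List.pairwise_singleton _ _))) <;>
    (intro o ho; simp only [List.mem_cons, List.not_mem_nil, or_false] at ho) <;>
    (rcases ho with rfl | rfl | rfl <;> (intro h; rw [Prod.ext_iff] at h; omega))

-- membership equivalence
theorem pvMem_pairs (seats : List (Int × Int × Int)) (p : Int × Int) :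
    p ∈ pvPairsOf (pvCells seats) ↔ p ∈ pvEA seats := by
  have hkn := pvCells_nodup_keys seats
  rw [pvPairs_norm]
  simp only [List.mem_flatMap]
  constructor
  · rintro ⟨kg, hkg, hpF⟩
    rcases List.mem_append.mp hpF with hc | hcr
    · obtain ⟨h1, h2, h3⟩ := (pvComb2_mem _ (pvGroup_pairwise seats kg.1) p).mp hc
      obtain ⟨hi1, hc1⟩ := (pvMem_group seats kg.1 p.1).mp h1
      obtain ⟨hi2, hc2⟩ := (pvMem_group seats kg.1 p.2).mp h2
      refine (pvMem_EA seats p).mpr ⟨hi1, hi2, h3, ?_⟩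
      rw [pvCond_iff]; left; rw [hc1, hc2]
    · obtain ⟨o, ho, hpo⟩ := List.mem_flatMap.mp hcr
      by_cases hco : (pvCells seats).contains o = true
      swap
      · rw [if_neg hco] at hpo; cases hpo
      rw [if_pos hco] at hpo
      obtain ⟨h1, h2, h3⟩ := (pvMem_blk seats kg.1 o p).mp hpo
      obtain ⟨hi1, hc1⟩ := (pvMem_group seats kg.1 p.1).mp h1
      obtain ⟨hi2, hc2⟩ := (pvMem_group seats o p.2).mp h2
      refine (pvMem_EA seats p).mpr ⟨hi1, hi2, h3, ?_⟩
      rw [pvCond_iff, hc1, hc2]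
      simp only [pvNbr, List.mem_cons, List.not_mem_nil, or_false] at ho
      rcases ho with rfl | rfl | rfl | rfl
      · right; left; constructor <;> simp
      · right; right; constructor <;> simp
      · right; left; constructor <;> simp
      · right; right; constructor <;> simp
  · intro hp
    obtain ⟨h1, h2, hlt, hcond⟩ := (pvMem_EA seats p).mp hp
    have hi : p.1 ∈ pvGroup seats (pvCell (pvG seats p.1)) := (pvMem_group _ _ _).mpr ⟨h1, rfl⟩
    have hj : p.2 ∈ pvGroup seats (pvCell (pvG seats p.2)) := (pvMem_group _ _ _).mpr ⟨h2, rfl⟩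
    have hk1 : pvCell (pvG seats p.1) ∈ (pvCells seats).keys :=
      (pvCells_mem_keys _ _).mpr ⟨p.1, h1, rfl⟩
    have hk2 : pvCell (pvG seats p.2) ∈ (pvCells seats).keys :=
      (pvCells_mem_keys _ _).mpr ⟨p.2, h2, rfl⟩
    have hco2 : (pvCells seats).contains (pvCell (pvG seats p.2)) = true :=
      (PySem.Dict.contains_iff_mem_keys _ _).mpr hk2
    refine ⟨(pvCell (pvG seats p.1), pvGroup seats (pvCell (pvG seats p.1))), ?_, ?_⟩
    · rw [PySem.Dict.items_eq_map_keys _ hkn []]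
      exact List.mem_map.mpr ⟨_, hk1, by rw [pvCells_getD]⟩
    · rw [pvCond_iff] at hcond
      apply List.mem_append.mpr
      rcases hcond with hsame | ⟨hrow, habs⟩ | ⟨hcol, habs⟩
      · left
        exact (pvComb2_mem _ (pvGroup_pairwise seats _) p).mpr ⟨hi, hsame ▸ hj, hlt⟩
      · right
        apply List.mem_flatMap.mpr
        refine ⟨pvCell (pvG seats p.2), ?_, ?_⟩
        · have : pvCell (pvG seats p.2) = ((pvCell (pvG seats p.1)).1, (pvCell (pvG seats p.1)).2 + 1)
              ∨ pvCell (pvG seats p.2) = ((pvCell (pvG seats p.1)).1, (pvCell (pvG seats p.1)).2 - 1) := by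
            rw [Prod.ext_iff, Prod.ext_iff]; omega
          rcases this with h | h <;> simp [pvNbr, h]
        · rw [if_pos hco2]
          exact (pvMem_blk seats _ _ p).mpr ⟨hi, hj, hlt⟩
      · right
        apply List.mem_flatMap.mpr
        refine ⟨pvCell (pvG seats p.2), ?_, ?_⟩
        · have : pvCell (pvG seats p.2) = ((pvCell (pvG seats p.1)).1 + 1, (pvCell (pvG seats p.1)).2)
              ∨ pvCell (pvG seats p.2) = ((pvCell (pvG seats p.1)).1 - 1, (pvCell (pvG seats p.1)).2) := by
            rw [Prod.ext_iff, Prod.ext_iff]; omega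
          rcases this with h | h <;> simp [pvNbr, h]
        · rw [if_pos hco2]
          exact (pvMem_blk seats _ _ p).mpr ⟨hi, hj, hlt⟩

-- nodup of both sides
theorem pvEA_pairwise (seats : List (Int × Int × Int)) :
    (pvEA seats).Pairwise (fun a b => pvKF a < pvKF b) := by
  exact (pvComb2_pairwise _ (pvIdx_pairwise seats)).filter _

theorem pvPairs_nodup (seats : List (Int × Int × Int)) : (pvPairsOf (pvCells seats)).Nodup := by
  have hkn := pvCells_nodup_keys seats
  rw [pvPairs_norm, List.nodup_flatMap]
  constructor
  · intro kg _
    apply List.Nodup.append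
    · exact pvNodup_of_pairwise_kf _ (pvComb2_pairwise _ (pvGroup_pairwise seats kg.1))
    · rw [List.nodup_flatMap]
      constructor
      · intro o _
        by_cases h : (pvCells seats).contains o = true
        · rw [if_pos h]; exact pvBlk_nodup seats kg.1 o
        · rw [if_neg h]; exact List.nodup_nil
      · refine (pvNbr_pairwise kg.1).imp ?_
        intro a b hab q hqa hqb
        simp only at hqa hqb
        by_cases ha : (pvCells seats).contains a = true
        · rw [if_pos ha] at hqa
          by_cases hb : (pvCells seats).contains b = true
          · rw [if_pos hb] at hqb
            exact hab ((pvBlk_snd seats kg.1 a q hqa).symm.trans (pvBlk_snd seats kg.1 b q hqb))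
          · rw [if_neg hb] at hqb; cases hqb
        · rw [if_neg ha] at hqa; cases hqa
    · intro q hq1 hq2
      have hc2 : pvCell (pvG seats q.2) = kg.1 := ((pvMem_group seats kg.1 q.2).mp
        ((pvComb2_mem _ (pvGroup_pairwise seats kg.1) q).mp hq1).2.1).2
      obtain ⟨o, ho, hqo⟩ := List.mem_flatMap.mp hq2
      by_cases h : (pvCells seats).contains o = true
      · rw [if_pos h] at hqo
        exact pvNbr_mem_ne kg.1 o ho ((pvBlk_snd seats kg.1 o q hqo).symm.trans hc2)
      · rw [if_neg h] at hqo; cases hqo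
  · have hpw : ((pvCells seats).items).Pairwise (fun a b => a.1 ≠ b.1) := by
      have : (((pvCells seats).items).map (fun p => p.1)).Nodup := hkn
      exact (List.pairwise_map.mp this)
    refine hpw.imp ?_
    intro a b hab q hqa hqb
    exact hab ((pvF_fst seats a.1 q hqa).symm.trans (pvF_fst seats b.1 q hqb))

-- sorted2 on pairs is sorted with the lexicographic key
theorem pvSorted2_eq (xs : List (Int × Int)) :
    PySem.List.sorted2 xs (fun p => p.1) (fun p => p.2) = PySem.List.sorted xs pvKF := by
  have hbe : (fun (a b : Int × Int) => decide (a.1 < b.1) || (!decide (b.1 < a.1) && decide (a.2 < b.2)))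
      = (fun (a b : Int × Int) => decide (pvKF a < pvKF b)) := by
    funext a b
    rcases lt_trichotomy a.1 b.1 with h | h | h <;>
      simp [pvKF_lt_iff, h, not_lt_of_gt]
  simp only [PySem.List.sorted2, PySem.List.sorted, Bool.false_eq_true, if_false, hbe]

theorem pvSorted_pairs (seats : List (Int × Int × Int)) :
    PySem.List.sorted2 (pvPairsOf (pvCells seats)) (fun p => p.1) (fun p => p.2) = pvEA seats := by
  rw [pvSorted2_eq]
  apply PySem.List.sorted_eq_of_perm_of_pairwise_lt
  · exact (List.perm_ext_iff_of_nodup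
      (pvNodup_of_pairwise_kf _ (pvEA_pairwise seats)) (pvPairs_nodup seats)).mpr
      (fun q => (pvMem_pairs seats q).symm)
  · exact pvEA_pairwise seats

-- fold equalities
theorem pvA_norm (seats : List (Int × Int × Int)) :
    adjacent_pairs_py seats = pvFlat ((pvEA seats).foldl (pvStep seats) PySem.Dict.empty).items := by
  have h : pvComb2 seats = (pvComb2 (pvIdx seats)).map (fun q => (pvG seats q.1, pvG seats q.2)) := by
    conv_lhs => rw [← PySem.List.map_pyGetD_pyRange_zero' seats (0, 0, 0)]
    rw [pvComb2_map]
    rfl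
  unfold adjacent_pairs_py
  rw [h]
  simp only [List.foldl_map]
  show pvFlat ((List.foldl
      (fun acc q => if pvCond (pvG seats q.1) (pvG seats q.2) = true then pvStep seats acc q else acc)
      PySem.Dict.empty (pvComb2 (pvIdx seats))).items) = _
  rw [PySem.List.foldl_if_eq_foldl_filter (fun q => pvCond (pvG seats q.1) (pvG seats q.2))
    (pvStep seats)]
  rfl

theorem pvB_norm (seats : List (Int × Int × Int)) :
    adjacent_pairs_py_alt seats = pvFlat ((pvEA seats).foldl (pvStep seats) PySem.Dict.empty).items := by
  have hget : ∀ i : Int, 0 ≤ i → i < (seats.length : Int) →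
      PySem.List.pyGet? seats i = some (pvG seats i) := by
    intro i h0 hlt
    obtain ⟨a, rfl⟩ : ∃ a : Nat, i = (a : Int) := ⟨i.toNat, (Int.toNat_of_nonneg h0).symm⟩
    have ha : a < seats.length := by exact_mod_cast hlt
    rw [PySem.List.pyGet?_natCast, List.getElem?_eq_getElem ha]
    unfold pvG
    rw [PySem.List.pyGetD_natCast]
    simp [List.getD_eq_getElem?_getD, List.getElem?_eq_getElem ha]
  unfold adjacent_pairs_py_alt
  simp only []
  rw [pvSorted_pairs]
  rw [PySem.List.foldl_congr_mem (pvEA seats) _ (pvStep seats) PySem.Dict.empty ?_]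
  intro acc q hq
  obtain ⟨h1, h2, _, _⟩ := (pvMem_EA seats q).mp hq
  simp only [pvIdx] at h1 h2
  rw [PySem.List.mem_pyRange_one] at h1 h2
  rw [hget q.1 h1.1 h1.2, hget q.2 h2.1 h2.2]
  rfl

-- ===== VERDICT (by name: the statement is the Claim_ definition above) =====
theorem adjacent_pairs_py_spec : Claim_equal_adjacent_pairs_py := by
  intro seats _
  unfold Spec_adjacent_pairs_py
  rw [pvA_norm, pvB_norm]
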